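-- pv_equiv track=rewrite | github.com/anastasigan12/anastasi5 | main (5).py | find_min_of_max_elements
-- ===== SOURCE A (Python) =====
-- def find_min_of_max_elements(matrix):
--     """Знаходимо мінімальний серед максимальних елементів стовпців"""
--     if not matrix:
--         return None
--
--     # Трансформуємо матрицю для однакових кількостей елементів у стовпцях
--     num_columns = max(len(row) for row in matrix)  # Найбільша кількість стовпців
--     max_elements = []
--
--     for col in range(num_columns):
--         # Отримуємо максимальний елемент для кожного стовпця
--         column_elements = [matrix[row][col] for row in range(len(matrix)) if col < len(matrix[row])]
--         if column_elements:
--             max_in_column = max(column_elements)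
--             max_elements.append(max_in_column)
--
--     return min(max_elements)
-- ===== SOURCE B (Python) =====
-- def find_min_of_max_elements(matrix):
--     """Знаходимо мінімальний серед максимальних елементів стовпців"""
--     if not matrix:
--         return None
--     colmax = []
--     for row in matrix:
--         merged = [max(a, b) for a, b in zip(colmax, row)]
--         if len(row) > len(colmax):
--             merged += row[len(colmax):]
--         else:
--             merged += colmax[len(row):]
--         colmax = merged
--     return min(colmax)
-- ===== Notes on version B (the rewrite author's own statement) =====
-- stated objective: alternative
-- what changed: Replaced A's column-major algorithm (one full scan of all rows per column index, gathering each column and taking its max) by a single row-major fold that merges every row into a running per-column-maximum list (zip with max plus the longer tail), then takes the min.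
import Mathlib
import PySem

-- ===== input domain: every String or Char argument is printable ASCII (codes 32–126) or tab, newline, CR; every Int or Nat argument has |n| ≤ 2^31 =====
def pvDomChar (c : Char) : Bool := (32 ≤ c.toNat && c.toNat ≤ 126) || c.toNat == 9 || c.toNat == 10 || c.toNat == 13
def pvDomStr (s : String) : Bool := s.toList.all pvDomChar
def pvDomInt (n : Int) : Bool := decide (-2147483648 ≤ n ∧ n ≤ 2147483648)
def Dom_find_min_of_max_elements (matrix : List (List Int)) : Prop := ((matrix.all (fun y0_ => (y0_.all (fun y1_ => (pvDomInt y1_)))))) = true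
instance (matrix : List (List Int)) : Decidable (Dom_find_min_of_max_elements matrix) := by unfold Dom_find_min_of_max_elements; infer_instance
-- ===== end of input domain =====

-- B replaces A's column-major gather (one scan of the whole matrix per column) by a single
-- row-major fold that merges each row into a running per-column-maximum list (objective: alternative).

-- ===== PORT A =====
-- literal port of A: guard, num_columns = max(len(row) for row in matrix),
-- then for each col in range(num_columns) the comprehension over the rows
-- ([matrix[row][col] for row in range(len(matrix)) if col < len(matrix[row])] is the
-- guarded traversal of the rows in order = filterMap over matrix), append max if nonempty,
-- finally min(max_elements) (none = ValueError on empty, excluded by Pre_).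
def find_min_of_max_elements (matrix : List (List Int)) : Option Int :=
  if matrix.isEmpty then none
  else
    match PySem.List.max? (matrix.map (fun row => (row.length : Int))) (fun y => y) with
    | none => none  -- unreachable: matrix is nonempty here
    | some num_columns =>
      let max_elements := (PySem.List.pyRange 0 num_columns 1).foldl (fun acc col =>
        let column_elements := matrix.filterMap
          (fun row => if col < (row.length : Int) then PySem.List.pyGet? row col else none)
        match PySem.List.max? column_elements (fun y => y) with
        | some max_in_column => acc ++ [max_in_column]
        | none => acc) ([] : List Int)
      PySem.List.min? max_elements (fun y => y)

-- ===== PORT B =====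
-- merge of one row into the running column-maxima: zip with max, keep the longer tail
-- ([max(a,b) for a,b in zip(colmax,row)] + the leftover slice of the longer list)
def pvMerge (colmax row : List Int) : List Int :=
  (List.zipWith max colmax row) ++
    (if row.length > colmax.length then row.drop colmax.length else colmax.drop row.length)

def find_min_of_max_elements_alt (matrix : List (List Int)) : Option Int :=
  if matrix.isEmpty then none
  else
    let colmax := matrix.foldl pvMerge ([] : List Int)
    PySem.List.min? colmax (fun y => y)

-- ===== PRECONDITION & SPEC =====
-- Pre_ excludes nonempty matrices all of whose rows are empty: there both A and B raise
-- ValueError (min of an empty sequence), so A returns no value.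
def Pre_find_min_of_max_elements (matrix : List (List Int)) : Prop :=
  matrix = [] ∨ ∃ r ∈ matrix, r ≠ []
instance (matrix : List (List Int)) : Decidable (Pre_find_min_of_max_elements matrix) := by
  unfold Pre_find_min_of_max_elements; infer_instance
def pvWitness_find_min_of_max_elements : List (List Int) := [[1, 2], [3]]

def Spec_find_min_of_max_elements (matrix : List (List Int)) (out : Option Int) : Prop := out = find_min_of_max_elements_alt matrix
instance (matrix : List (List Int)) (out : Option Int) : Decidable (Spec_find_min_of_max_elements matrix out) := by unfold Spec_find_min_of_max_elements; infer_instance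

-- ===== CLAIM (what is proved, stated in full; the proofs are below) =====
def Claim_equal_find_min_of_max_elements : Prop := ∀ (matrix : List (List Int)), Dom_find_min_of_max_elements matrix → Pre_find_min_of_max_elements matrix → Spec_find_min_of_max_elements matrix (find_min_of_max_elements matrix)

-- ===== LEMMAS AND PROOFS =====

-- max of two optional values (absorbing none)
def pvOpMax : Option Int → Option Int → Option Int
  | none, b => b
  | some a, none => some a
  | some a, some b => some (max a b)

theorem pvOpMax_none_right (a : Option Int) : pvOpMax a none = a := by
  cases a <;> rfl

theorem pvOpMax_assoc (a b c : Option Int) :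
    pvOpMax (pvOpMax a b) c = pvOpMax a (pvOpMax b c) := by
  cases a <;> cases b <;> cases c <;> simp [pvOpMax, max_assoc]

theorem pvMerge_nil_left (b : List Int) : pvMerge [] b = b := by
  cases b <;> simp [pvMerge]

theorem pvMerge_nil_right (a : List Int) : pvMerge a [] = a := by
  cases a <;> simp [pvMerge]

theorem pvMerge_cons (x y : Int) (a b : List Int) :
    pvMerge (x :: a) (y :: b) = max x y :: pvMerge a b := by
  by_cases h : b.length > a.length <;>
    simp [pvMerge, h]

theorem pvMerge_getElem? (a b : List Int) (j : Nat) :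
    (pvMerge a b)[j]? = pvOpMax a[j]? b[j]? := by
  induction a generalizing b j with
  | nil => simp [pvMerge_nil_left, pvOpMax]
  | cons x xs ih =>
    cases b with
    | nil => simp [pvMerge_nil_right, pvOpMax_none_right]
    | cons y ys =>
      rw [pvMerge_cons]
      cases j with
      | zero => simp [pvOpMax]
      | succ k => simpa using ih ys k

theorem pvMerge_length (a b : List Int) :
    (pvMerge a b).length = max a.length b.length := by
  by_cases h : b.length > a.length <;> simp [pvMerge, h] <;> omega

theorem foldl_pvMerge_getElem? (rows : List (List Int)) (acc : List Int) (j : Nat) :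
    (rows.foldl pvMerge acc)[j]? = rows.foldl (fun o r => pvOpMax o r[j]?) acc[j]? := by
  induction rows generalizing acc with
  | nil => rfl
  | cons r rs ih => simp [List.foldl_cons, ih, pvMerge_getElem?]

theorem foldl_pvMerge_length (rows : List (List Int)) (acc : List Int) :
    (rows.foldl pvMerge acc).length = rows.foldl (fun n r => max n r.length) acc.length := by
  induction rows generalizing acc with
  | nil => rfl
  | cons r rs ih => simp [List.foldl_cons, ih, pvMerge_length]

-- max? with identity key of a cons, as pvOpMax
theorem max?_id_cons_opMax (v : Int) (l : List Int) :
    PySem.List.max? (v :: l) (fun y => y) =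
      pvOpMax (some v) (PySem.List.max? l (fun y => y)) := by
  cases l with
  | nil =>
    rw [PySem.List.max?_id_cons]
    rfl
  | cons w t =>
    rw [PySem.List.max?_id_cons, PySem.List.max?_id_cons]
    show some ((w :: t).foldl max v) = some (max v (t.foldl max w))
    have : (w :: t).foldl max v = t.foldl max (max v w) := rfl
    rw [this, List.foldl_assoc]

-- the accumulator form of max over one column
theorem foldl_opMax_eq_max? (rows : List (List Int)) (j : Nat) (o : Option Int) :
    rows.foldl (fun o r => pvOpMax o r[j]?) o =
      pvOpMax o (PySem.List.max? (rows.filterMap (fun r => r[j]?)) (fun y => y)) := by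
  induction rows generalizing o with
  | nil =>
    simp only [List.foldl_nil, List.filterMap_nil]
    rw [show PySem.List.max? ([] : List Int) (fun y => y) = none from rfl, pvOpMax_none_right]
  | cons r rs ih =>
    simp only [List.foldl_cons, List.filterMap_cons]
    cases hr : r[j]? with
    | none => rw [ih, pvOpMax_none_right]
    | some v => rw [ih, max?_id_cons_opMax, ← pvOpMax_assoc]

-- A's append-or-skip loop is a filterMap
theorem foldl_match_append (g : Int → Option Int) (xs : List Int) (init : List Int) :
    xs.foldl (fun acc col =>
      match g col with
      | some m => acc ++ [m]
      | none => acc) init = init ++ xs.filterMap g := by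
  induction xs generalizing init with
  | nil => simp
  | cons x t ih =>
    simp only [List.foldl_cons, List.filterMap_cons]
    cases hg : g x <;> simp [ih]

-- reading every index of a list back yields the list
theorem range_filterMap_getElem? (l : List Int) :
    (List.range l.length).filterMap (fun k => l[k]?) = l := by
  induction l with
  | nil => simp
  | cons x xs ih =>
    rw [List.length_cons, List.range_succ_eq_map]
    simp only [List.filterMap_cons, List.filterMap_map]
    simpa using ih

-- cast bridge for the running maximum of the row lengths
theorem foldl_max_len_cast (rs : List (List Int)) (a : Nat) :
    (rs.map (fun r => (r.length : Int))).foldl max (a : Int) =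
      ((rs.foldl (fun n r => max n r.length) a : Nat) : Int) := by
  induction rs generalizing a with
  | nil => rfl
  | cons r t ih =>
    simp only [List.map_cons, List.foldl_cons]
    rw [show (max (a : Int) (r.length : Int)) = ((max a r.length : Nat) : Int) by push_cast; rfl, ih]

theorem column_elements_eq (matrix : List (List Int)) (k : Nat) :
    matrix.filterMap
        (fun row => if (k : Int) < (row.length : Int) then PySem.List.pyGet? row (k : Int) else none) =
      matrix.filterMap (fun r => r[k]?) := by
  apply List.filterMap_congr
  intro r _
  by_cases h : k < r.length
  · rw [if_pos (by exact_mod_cast h), PySem.List.pyGet?_natCast]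
  · rw [if_neg (by exact_mod_cast h), eq_comm, List.getElem?_eq_none_iff]
    omega

-- ===== VERDICT (by name: the statement is the Claim_ definition above) =====
theorem find_min_of_max_elements_spec : Claim_equal_find_min_of_max_elements := by
  intro matrix _ _
  show find_min_of_max_elements matrix = find_min_of_max_elements_alt matrix
  cases matrix with
  | nil => rfl
  | cons r rs =>
    unfold find_min_of_max_elements find_min_of_max_elements_alt
    simp only [List.isEmpty_cons, Bool.false_eq_true, if_false]
    -- the running column maxima
    set colmax := (r :: rs).foldl pvMerge ([] : List Int) with hcm
    -- the number of columns, as a natural number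
    set L : Nat := (r :: rs).foldl (fun n rr => max n rr.length) 0 with hL
    have hlen : colmax.length = L := by
      rw [hcm, foldl_pvMerge_length]; rfl
    -- A's num_columns computes to (L : Int)
    have hnc : PySem.List.max? ((r :: rs).map (fun row => (row.length : Int))) (fun y => y)
        = some ((L : Int)) := by
      rw [List.map_cons, PySem.List.max?_id_cons, foldl_max_len_cast]
      have : rs.foldl (fun n rr => max n rr.length) r.length = L := by
        simp [hL, List.foldl_cons]
      rw [this]
    simp only [hnc]
    -- A's max_elements list equals colmax
    have hrange : PySem.List.pyRange 0 (L : Int) 1 = (List.range L).map (fun (k : Nat) => (k : Int)) := by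
      rw [PySem.List.pyRange_one]
      simp only [Int.sub_zero, Int.toNat_natCast]
      exact List.map_congr_left (fun k _ => by omega)
    rw [foldl_match_append, List.nil_append, hrange, List.filterMap_map]
    have hels : (List.range L).filterMap
        (fun (k : Nat) => PySem.List.max?
          ((r :: rs).filterMap
            (fun row => if (k : Int) < (row.length : Int) then PySem.List.pyGet? row (k : Int) else none))
          (fun y => y)) = colmax := by
      have hstep : ∀ k : Nat, PySem.List.max?
          ((r :: rs).filterMap
            (fun row => if (k : Int) < (row.length : Int) then PySem.List.pyGet? row (k : Int) else none))
          (fun y => y) = colmax[k]? := by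
        intro k
        rw [column_elements_eq, hcm, foldl_pvMerge_getElem?]
        rw [foldl_opMax_eq_max? (r :: rs) k]
        simp [pvOpMax]
      calc (List.range L).filterMap _
          = (List.range L).filterMap (fun k => colmax[k]?) := by
            apply List.filterMap_congr; intro k _; exact hstep k
        _ = colmax := by rw [← hlen, range_filterMap_getElem?]
    exact congrArg (fun l => PySem.List.min? l (fun y => y)) hels
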